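-- pv_equiv track=rewrite | github.com/osceri/AMS-CC | xver/xpy rx/parser.py | flip_paras
-- ===== SOURCE A (Python) =====
-- def flip_paras(content):
--     new = ""
--     parity = 1
--     for letter in content:
--         if "$" == letter:
--             if parity:
--                 new += "{"
--                 parity = 0
--             else:
--                 new += "}"
--                 parity = 1
--         elif "{" == letter:
--             new += "{left_bracket}"
--         elif "}" == letter:
--             new += "{right_bracket}"
--         elif "\"" == letter:
--             new += "{quote}"
--         else:
--             new += letter
--     return new
-- ===== SOURCE B (Python) =====
-- _TR = {ord('{'): '{left_bracket}', ord('}'): '{right_bracket}', ord('"'): '{quote}'}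
--
-- def flip_paras(content):
--     parts = content.split('$')
--     pieces = [parts[0].translate(_TR)]
--     for i, part in enumerate(parts[1:]):
--         pieces.append('{' if i % 2 == 0 else '}')
--         pieces.append(part.translate(_TR))
--     return ''.join(pieces)
-- ===== Notes on version B (the rewrite author's own statement) =====
-- stated objective: faster
-- what changed: Replaced the char-by-char loop with a mutable parity flag and repeated string += by splitting the input on the dollar separator and emitting an opening/closing brace chosen by segment-index parity, translating each segment via str.translate and joining once.
import Mathlib
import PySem

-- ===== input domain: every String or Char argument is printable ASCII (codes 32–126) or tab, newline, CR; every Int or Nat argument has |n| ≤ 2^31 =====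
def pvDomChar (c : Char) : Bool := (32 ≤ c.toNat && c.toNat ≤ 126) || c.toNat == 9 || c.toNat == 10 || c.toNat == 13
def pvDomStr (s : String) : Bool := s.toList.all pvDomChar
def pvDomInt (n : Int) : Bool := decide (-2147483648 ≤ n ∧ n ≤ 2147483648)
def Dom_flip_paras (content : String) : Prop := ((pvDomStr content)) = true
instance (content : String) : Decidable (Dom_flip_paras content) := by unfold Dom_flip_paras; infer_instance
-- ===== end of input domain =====

-- B replaces A's per-character loop with a parity flag by a split on '$' with index-parity braces; objective: alternative decomposition.

-- ===== PORT A =====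
-- one iteration of A's for-loop: state = (new, parity)
def flipStep (st : List Char × Int) (letter : Char) : List Char × Int :=
  if letter = '$' then
    if st.2 ≠ 0 then (st.1 ++ ['{'], 0) else (st.1 ++ ['}'], 1)
  else if letter = '{' then (st.1 ++ "{left_bracket}".toList, st.2)
  else if letter = '}' then (st.1 ++ "{right_bracket}".toList, st.2)
  else if letter = '"' then (st.1 ++ "{quote}".toList, st.2)
  else (st.1 ++ [letter], st.2)

def flip_paras (content : String) : String :=
  String.mk (content.toList.foldl flipStep ([], 1)).1

-- ===== PORT B =====
-- str.translate on one character (B's _TR table)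
def trChar (c : Char) : List Char :=
  if c = '{' then "{left_bracket}".toList
  else if c = '}' then "{right_bracket}".toList
  else if c = '"' then "{quote}".toList
  else [c]

-- part.translate(_TR)
def trPart (cs : List Char) : List Char := cs.flatMap trChar

-- the enumerate loop over parts[1:]: brace by index parity, then the translated part
def altGo : List (List Char) → Nat → List Char
  | [], _ => []
  | p :: rest, i => (if i % 2 = 0 then ['{'] else ['}']) ++ trPart p ++ altGo rest (i + 1)

def flip_paras_alt (content : String) : String :=
  match content.toList.splitOn '$' with
  | [] => ""            -- unreachable: split never returns an empty list
  | p0 :: rest => String.mk (trPart p0 ++ altGo rest 0)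

-- ===== PRECONDITION & SPEC =====
def Spec_flip_paras (content : String) (out : String) : Prop := out = flip_paras_alt content
instance (content : String) (out : String) : Decidable (Spec_flip_paras content out) := by unfold Spec_flip_paras; infer_instance

-- ===== CLAIM (what is proved, stated in full; the proofs are below) =====
def Claim_equal_flip_paras : Prop := ∀ (content : String), Dom_flip_paras content → Spec_flip_paras content (flip_paras content)

-- ===== LEMMAS AND PROOFS =====

-- A's loop as a pure recursion producing only the emitted characters
def Arec : List Char → Int → List Char
  | [], _ => []
  | c :: l, p =>
    if c = '$' then (if p ≠ 0 then '{' :: Arec l 0 else '}' :: Arec l 1)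
    else trChar c ++ Arec l p

theorem foldl_flipStep_eq (l : List Char) :
    ∀ (acc : List Char) (p : Int), (l.foldl flipStep (acc, p)).1 = acc ++ Arec l p := by
  induction l with
  | nil => intro acc p; simp [Arec]
  | cons c l ih =>
    intro acc p
    by_cases hc : c = '$'
    · by_cases hp : p ≠ 0
      · simp [hc, hp, flipStep, Arec, List.foldl_cons, ih]
      · simp at hp
        simp [hc, hp, flipStep, Arec, List.foldl_cons, ih]
    · simp only [List.foldl_cons, flipStep, Arec, if_neg hc]
      split_ifs <;> simp_all [trChar]

-- Python's parity value after i '$'-signs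
def pb (i : Nat) : Int := if i % 2 = 0 then 1 else 0

theorem arec_eq_brec (l : List Char) : ∀ i : Nat,
    Arec l (pb i) =
      (match List.splitOnP (· == '$') l with
       | [] => []
       | p0 :: rest => trPart p0 ++ altGo rest i) := by
  induction l with
  | nil => intro i; simp [Arec, List.splitOnP_nil, trPart, altGo]
  | cons c l ih =>
    intro i
    rcases hs : List.splitOnP (· == '$') l with _ | ⟨p0, rest⟩
    · exact absurd hs (List.splitOnP_ne_nil _ l)
    by_cases hc : c = '$'
    · have hsp : List.splitOnP (· == '$') (c :: l) = [] :: p0 :: rest := by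
        simp [List.splitOnP_cons, hc, hs]
      by_cases hi : i % 2 = 0
      · have h2 : (i + 1) % 2 ≠ 0 := by omega
        have hIH := ih (i + 1); rw [hs] at hIH
        rw [show pb (i + 1) = 0 from by simp [pb, h2]] at hIH
        simp [hs, Arec, hc, pb, hi, trPart, altGo, hIH]
      · have h2 : (i + 1) % 2 = 0 := by omega
        have hIH := ih (i + 1); rw [hs] at hIH
        rw [show pb (i + 1) = 1 from by simp [pb, h2]] at hIH
        simp [hs, Arec, hc, pb, hi, trPart, altGo, hIH]
    · have hsp : List.splitOnP (· == '$') (c :: l) = (c :: p0) :: rest := by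
        simp [List.splitOnP_cons, hc, hs]
      simp [hsp, Arec, hc, trPart, ih i, hs]

-- ===== VERDICT (by name: the statement is the Claim_ definition above) =====
theorem flip_paras_spec : Claim_equal_flip_paras := by
  intro content _
  unfold Spec_flip_paras flip_paras flip_paras_alt
  rw [foldl_flipStep_eq]
  have h := arec_eq_brec content.toList 0
  have hpb : pb 0 = 1 := by simp [pb]
  rw [hpb] at h
  rcases hs : List.splitOnP (· == '$') content.toList with _ | ⟨p0, rest⟩
  · exact absurd hs (List.splitOnP_ne_nil _ _)
  · rw [hs] at h
    simp [List.splitOn, hs, h]
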